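-- pv_equiv track=rewrite | github.com/ManfredAabye/OSSL2Gifv2 | image_processing.py | calculate_optimal_grid
-- ===== SOURCE A (Python) =====
-- import math
--
-- def calculate_optimal_grid(frame_count: int, prefer_single_row_odd: bool = True) -> tuple[int, int]:
-- 	"""
-- 	Berechnet optimale Raster-Aufteilung für Frames.
-- 	Bevorzugt Layouts ohne Verschwendung (leere Zellen) und möglichst quadratische Form.
--
-- 	Beispiele:
-- 	- 10 Frames: 5x2 (besser als 4x3 mit 2 leeren Zellen)
-- 	- 16 Frames: 4x4 (perfekt quadratisch)
-- 	- 15 Frames: 5x3 (besser als 4x4 mit 1 leerer Zelle)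
--
-- 	Returns:
-- 		(tiles_x, tiles_y) - Anzahl Spalten und Zeilen
-- 	"""
-- 	if frame_count <= 0:
-- 		return (1, 1)
-- 	if frame_count == 1:
-- 		return (1, 1)
--
-- 	# Finde beste Faktorisierung
-- 	best_x, best_y = 1, frame_count
-- 	best_waste = frame_count - 1  # Maximal mögliche Verschwendung
-- 	best_ratio = float('inf')
--
-- 	# Prüfe alle möglichen Aufteilungen bis sqrt(frame_count)
-- 	# Wir müssen nur bis sqrt prüfen, da darüber hinaus die Faktoren sich wiederholen
-- 	max_check = int(math.sqrt(frame_count * 2)) + 1  # Etwas Puffer für nicht-perfekte Quadrate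
--
-- 	for x in range(1, max_check + 1):
-- 		y = math.ceil(frame_count / x)
-- 		total_cells = x * y
-- 		waste = total_cells - frame_count
-- 		ratio = max(x, y) / min(x, y)  # Seitenverhältnis (>=1)
--
-- 		# Entscheidungskriterien (Priorität absteigend):
-- 		# 1. Minimiere Verschwendung (leere Zellen)
-- 		# 2. Bei gleicher Verschwendung: bevorzuge quadratischere Form
-- 		is_better = False
-- 		if waste < best_waste:
-- 			is_better = True
-- 		elif waste == best_waste and ratio < best_ratio:
-- 			is_better = True
--
-- 		if is_better:
-- 			best_x, best_y = x, y
-- 			best_waste = waste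
-- 			best_ratio = ratio
--
-- 	# Optional: Bei ungerader Frame-Zahl nicht einreihig anordnen.
-- 	# Beispiel: 5 Frames -> 3x2 statt 5x1
-- 	if not prefer_single_row_odd and frame_count > 3 and frame_count % 2 == 1 and min(best_x, best_y) == 1:
-- 		compact_x = math.ceil(math.sqrt(frame_count))
-- 		compact_y = math.ceil(frame_count / compact_x)
-- 		best_x, best_y = compact_x, compact_y
--
-- 	# Stelle sicher, dass tiles_x >= tiles_y (mehr Spalten als Zeilen)
-- 	if best_x < best_y:
-- 		best_x, best_y = best_y, best_x
--
-- 	return (best_x, best_y)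
-- ===== SOURCE B (Python) =====
-- import math
--
-- def calculate_optimal_grid(frame_count: int, prefer_single_row_odd: bool = True) -> tuple[int, int]:
--     """Optimal grid for frame_count tiles: zero waste is always achievable (1 x n),
--     so the best layout is the divisor pair of frame_count closest to square."""
--     if frame_count <= 1:
--         return (1, 1)
--     n = frame_count
--     # largest divisor d of n with d*d <= n (scan downward from isqrt(n))
--     d = math.isqrt(n)
--     while n % d != 0:
--         d -= 1
--     if not prefer_single_row_odd and n > 3 and n % 2 == 1 and d == 1:
--         # avoid a single row for odd counts: near-square compact layout
--         cx = math.isqrt(n) + 1  # == ceil(sqrt(n)); n is prime here, never a square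
--         return (cx, -(-n // cx))
--     return (n // d, d)
-- ===== Notes on version B (the rewrite author's own statement) =====
-- stated objective: simpler
-- what changed: A scans every x up to sqrt(2n)+1 ranking candidates by waste then float aspect ratio; B exploits that zero waste is always achievable, so the optimum is just the divisor pair of frame_count closest to square, found by scanning downward from isqrt(frame_count) for the largest divisor.
import Mathlib
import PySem

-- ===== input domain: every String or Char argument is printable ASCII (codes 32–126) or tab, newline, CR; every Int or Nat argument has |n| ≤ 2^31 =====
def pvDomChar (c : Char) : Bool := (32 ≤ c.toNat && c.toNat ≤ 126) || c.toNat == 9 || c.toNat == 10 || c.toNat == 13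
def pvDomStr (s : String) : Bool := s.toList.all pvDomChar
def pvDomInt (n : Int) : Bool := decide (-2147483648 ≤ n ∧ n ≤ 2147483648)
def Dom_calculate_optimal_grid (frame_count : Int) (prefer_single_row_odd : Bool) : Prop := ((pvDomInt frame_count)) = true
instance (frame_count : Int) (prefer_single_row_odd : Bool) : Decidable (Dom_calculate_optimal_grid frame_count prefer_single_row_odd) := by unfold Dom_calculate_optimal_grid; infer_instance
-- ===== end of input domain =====

-- B replaces A's candidate scan (all x up to sqrt(2n)+1 ranked by waste, then aspect ratio)
-- by a direct downward search for the largest divisor d ≤ isqrt(n): zero waste is always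
-- achievable, so A's winner is the divisor pair closest to square (objective: simpler).

-- ===== PORT A =====

-- math.ceil(a / b) for b > 0, ported as exact ceiling division -((-a) // b): on the
-- admitted domain Python's float quotient is never close enough to an integer it does not
-- attain for its ceiling to differ from the exact one.
def cog_ceilDiv (a b : Int) : Int := -(PySem.Int.floordiv (-a) b)

-- 'ratio < best_ratio' where best_ratio may still be float('inf') (ported as none)
def cog_ltInf (r : ℚ) (o : Option ℚ) : Bool :=
  match o with
  | none => true
  | some b => decide (r < b)

-- one iteration of A's loop; state = (best_x, best_y, best_waste, best_ratio).
-- The float ratio max/min is ported as the exact rational: the relative gaps between the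
-- ratios this loop ever compares far exceed double rounding error on the admitted domain,
-- so the float comparisons coincide with the exact ones.
def cog_step (n : Int) (st : Int × Int × Int × Option ℚ) (x : Int) : Int × Int × Int × Option ℚ :=
  let y := cog_ceilDiv n x
  let waste := x * y - n
  let ratio : ℚ := ((max x y : Int) : ℚ) / ((min x y : Int) : ℚ)
  if waste < st.2.2.1 then (x, y, waste, some ratio)
  else if waste = st.2.2.1 ∧ cog_ltInf ratio st.2.2.2 = true then (x, y, waste, some ratio)
  else st

def calculate_optimal_grid (frame_count : Int) (prefer_single_row_odd : Bool) : Int × Int :=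
  if frame_count ≤ 0 then (1, 1)
  else if frame_count = 1 then (1, 1)
  else
    let maxCheck : Int := ((frame_count * 2).toNat.sqrt : Int) + 1
    let st := (PySem.List.pyRange 1 (maxCheck + 1)).foldl (cog_step frame_count)
                (1, frame_count, frame_count - 1, none)
    let p :=
      if prefer_single_row_odd = false ∧ frame_count > 3 ∧
         PySem.Int.mod frame_count 2 = 1 ∧ min st.1 st.2.1 = 1 then
        let s : Int := (frame_count.toNat.sqrt : Int)
        let cx := if s * s = frame_count then s else s + 1
        (cx, cog_ceilDiv frame_count cx)
      else (st.1, st.2.1)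
    if p.1 < p.2 then (p.2, p.1) else p

-- ===== PORT B =====

-- B's 'while n % d != 0: d -= 1' scanning downward from isqrt(n); structural on the counter
def cog_findDiv (n : Int) : Nat → Int
  | 0 => 1
  | (k+1) => if PySem.Int.mod n ((k+1 : Nat) : Int) = 0 then ((k+1 : Nat) : Int)
             else cog_findDiv n k

def calculate_optimal_grid_alt (frame_count : Int) (prefer_single_row_odd : Bool) : Int × Int :=
  if frame_count ≤ 1 then (1, 1)
  else
    let d := cog_findDiv frame_count frame_count.toNat.sqrt
    if prefer_single_row_odd = false ∧ frame_count > 3 ∧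
       PySem.Int.mod frame_count 2 = 1 ∧ d = 1 then
      let cx : Int := (frame_count.toNat.sqrt : Int) + 1
      (cx, -(PySem.Int.floordiv (-frame_count) cx))
    else (PySem.Int.floordiv frame_count d, d)

-- ===== PRECONDITION & SPEC =====
def Spec_calculate_optimal_grid (frame_count : Int) (prefer_single_row_odd : Bool) (out : Int × Int) : Prop := out = calculate_optimal_grid_alt frame_count prefer_single_row_odd
instance (frame_count : Int) (prefer_single_row_odd : Bool) (out : Int × Int) : Decidable (Spec_calculate_optimal_grid frame_count prefer_single_row_odd out) := by unfold Spec_calculate_optimal_grid; infer_instance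

-- ===== CLAIM (what is proved, stated in full; the proofs are below) =====
def Claim_equal_calculate_optimal_grid : Prop := ∀ (frame_count : Int) (prefer_single_row_odd : Bool), Dom_calculate_optimal_grid frame_count prefer_single_row_odd → Spec_calculate_optimal_grid frame_count prefer_single_row_odd (calculate_optimal_grid frame_count prefer_single_row_odd)

-- ===== LEMMAS AND PROOFS =====

-- "d is the greatest divisor of n that is ≤ k and whose square is ≤ n"
def cogIsBest (n k d : Int) : Prop :=
  d ∣ n ∧ 1 ≤ d ∧ d ≤ k ∧ d * d ≤ n ∧
  ∀ e : Int, e ∣ n → 1 ≤ e → e ≤ k → e * e ≤ n → e ≤ d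

lemma cog_ceilDiv_bounds {a b : Int} (hb : 0 < b) :
    (cog_ceilDiv a b - 1) * b < a ∧ a ≤ cog_ceilDiv a b * b :=
  (PySem.Int.neg_floordiv_neg_eq_iff_of_pos hb).mp rfl

lemma cog_ceilDiv_of_dvd {n x : Int} (hx : 0 < x) (hd : x ∣ n) :
    cog_ceilDiv n x = n / x := by
  apply (PySem.Int.neg_floordiv_neg_eq_iff_of_pos hx).mpr
  have h : n / x * x = n := Int.ediv_mul_cancel hd
  constructor
  · nlinarith
  · exact le_of_eq h.symm

-- A's loop invariant: after scanning x = 1..K the state is the greatest divisor d of n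
-- with d ≤ K and d² ≤ n, paired with its cofactor, zero waste, and its aspect ratio
lemma cog_loop_inv (n : Int) (hn : 2 ≤ n) :
    ∀ K : Int, 1 ≤ K → ∃ d, cogIsBest n K d ∧
      (PySem.List.pyRange 1 (K + 1)).foldl (cog_step n) (1, n, n - 1, none)
        = (d, n / d, 0, some (((n / d : Int) : ℚ) / (d : ℚ))) := by
  intro K hK
  induction K, hK using Int.le_induction with
  | base =>
    refine ⟨1, ⟨one_dvd n, le_refl 1, le_refl 1, by nlinarith, fun e _ _ h2 _ => h2⟩, ?_⟩
    have hr : PySem.List.pyRange 1 (1 + 1) = [1] := by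
      rw [PySem.List.pyRange_one_cons (by norm_num)]
      norm_num
    rw [hr]
    simp only [List.foldl, cog_step]
    rw [cog_ceilDiv_of_dvd one_pos (one_dvd n)]
    simp only [Int.ediv_one]
    rw [if_pos (by omega : 1 * n - n < n - 1)]
    simp [max_eq_right (by omega : (1:Int) ≤ n), min_eq_left (by omega : (1:Int) ≤ n)]
  | succ K hK1 ih =>
    obtain ⟨d, ⟨hdvd, hd1, hdK, hdsq, hmax⟩, hfold⟩ := ih
    set x := K + 1 with hxdef
    have hx2 : 2 ≤ x := by omega
    have hx0 : (0:Int) < x := by omega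
    have hd0 : (0:Int) < d := by omega
    have hn0 : (0:Int) < n := by omega
    have hde : n / d * d = n := Int.ediv_mul_cancel hdvd
    have hrange : PySem.List.pyRange 1 (x + 1) = PySem.List.pyRange 1 x ++ [x] := by
      exact PySem.List.pyRange_one_succ_right (by omega)
    rw [hrange, List.foldl_append, hfold]
    simp only [List.foldl]
    by_cases hxd : x ∣ n
    · have hy : cog_ceilDiv n x = n / x := cog_ceilDiv_of_dvd hx0 hxd
      have hxe : n / x * x = n := Int.ediv_mul_cancel hxd
      have hwaste : x * cog_ceilDiv n x - n = 0 := by rw [hy]; rw [mul_comm]; omega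
      by_cases hsq : x * x ≤ n
      · -- new best: x
        have hxy : x ≤ n / x := by nlinarith
        have hlt : ((n / x : Int) : ℚ) / (x : ℚ) < ((n / d : Int) : ℚ) / (d : ℚ) := by
          rw [div_lt_div_iff₀ (by exact_mod_cast hx0) (by exact_mod_cast hd0)]
          have hdx : d < x := by omega
          have key : (n / x * d) * (x * d) < (n / d * x) * (x * d) := by
            have e1 : (n / x * d) * (x * d) = n * (d * d) := by
              calc (n / x * d) * (x * d) = (n / x * x) * (d * d) := by ring
                _ = n * (d * d) := by rw [hxe]
            have e2 : (n / d * x) * (x * d) = n * (x * x) := by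
              calc (n / d * x) * (x * d) = (n / d * d) * (x * x) := by ring
                _ = n * (x * x) := by rw [hde]
            rw [e1, e2]
            have hlt2 : d * d < x * x := by nlinarith
            exact mul_lt_mul_of_pos_left hlt2 hn0
          have : (n / x) * d < (n / d) * x :=
            lt_of_mul_lt_mul_right key (by positivity)
          exact_mod_cast this
        refine ⟨x, ⟨hxd, by omega, le_refl x, hsq, fun e _ _ h2 _ => h2⟩, ?_⟩
        simp only [cog_step]
        rw [if_neg (by omega), if_pos]
        · rw [hy]
          have hw2 : x * (n / x) - n = 0 := by rw [mul_comm]; omega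
          rw [hw2, max_eq_right hxy, min_eq_left hxy]
        · constructor
          · exact hwaste
          · simp only [cog_ltInf, hy, max_eq_right hxy, min_eq_left hxy]
            exact decide_eq_true hlt
      · -- x too large: cofactor already seen, ratio not strictly better
        rw [not_le] at hsq
        have hy1 : 1 ≤ n / x := by nlinarith
        have hyx : n / x < x := by nlinarith
        have hydvd : n / x ∣ n := ⟨x, hxe.symm⟩
        have hyd : n / x ≤ d := hmax (n / x) hydvd hy1 (by omega) (by nlinarith)
        have hnlt : ¬ ((x : ℚ) / ((n / x : Int) : ℚ) < ((n / d : Int) : ℚ) / (d : ℚ)) := by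
          rw [not_lt, div_le_div_iff₀ (by exact_mod_cast hd0) (by exact_mod_cast hy1.trans_lt' zero_lt_one)]
          have key : (n / d * (n / x)) * d ≤ (x * d) * d := by
            have e1 : (n / d * (n / x)) * d = x * (n / x * (n / x)) := by
              calc (n / d * (n / x)) * d = (n / d * d) * (n / x) := by ring
                _ = n * (n / x) := by rw [hde]
                _ = (n / x * x) * (n / x) := by rw [hxe]
                _ = x * (n / x * (n / x)) := by ring
            have e2 : (x * d) * d = x * (d * d) := by ring
            rw [e1, e2]
            have hsq2 : n / x * (n / x) ≤ d * d := by nlinarith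
            exact mul_le_mul_of_nonneg_left hsq2 (le_of_lt hx0)
          have : (n / d) * (n / x) ≤ x * d :=
            le_of_mul_le_mul_right key hd0
          exact_mod_cast this
        refine ⟨d, ⟨hdvd, hd1, by omega, hdsq, ?_⟩, ?_⟩
        · intro e he h1 h2 h3
          rcases lt_or_eq_of_le h2 with h | h
          · exact hmax e he h1 (by omega) h3
          · exfalso; rw [h] at h3; omega
        · simp only [cog_step]
          rw [if_neg (by omega), if_neg]
          rintro ⟨-, hb⟩
          simp only [cog_ltInf, hy, max_eq_left (le_of_lt hyx), min_eq_right (le_of_lt hyx)] at hb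
          exact hnlt (of_decide_eq_true hb)
    · -- not a divisor: positive waste, no update
      have hb := cog_ceilDiv_bounds (a := n) hx0
      have hne : n ≠ cog_ceilDiv n x * x := by
        intro h; exact hxd ⟨cog_ceilDiv n x, by linarith [h, mul_comm (cog_ceilDiv n x) x]⟩
      have hwaste : 0 < x * cog_ceilDiv n x - n := by
        have := hb.2
        rcases lt_or_eq_of_le this with h | h
        · nlinarith
        · exact absurd h hne
      refine ⟨d, ⟨hdvd, hd1, by omega, hdsq, ?_⟩, ?_⟩
      · intro e he h1 h2 h3
        rcases lt_or_eq_of_le h2 with h | h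
        · exact hmax e he h1 (by omega) h3
        · exfalso; rw [h] at he; exact hxd he
      · simp only [cog_step]
        rw [if_neg (by omega), if_neg]
        rintro ⟨hz, -⟩
        omega

-- B's downward scan returns the greatest divisor of n that is ≤ k
lemma cog_findDiv_spec (n : Int) :
    ∀ k : Nat, 1 ≤ k →
      cog_findDiv n k ∣ n ∧ 1 ≤ cog_findDiv n k ∧ cog_findDiv n k ≤ (k : Int) ∧
      ∀ e : Int, e ∣ n → 1 ≤ e → e ≤ (k : Int) → e ≤ cog_findDiv n k := by
  intro k
  induction k with
  | zero => intro h; omega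
  | succ k ih =>
    intro _
    by_cases hdvd : PySem.Int.mod n ((k+1 : Nat) : Int) = 0
    · simp only [cog_findDiv, hdvd, if_pos]
      have hd : ((k+1:Nat):Int) ∣ n := (PySem.Int.mod_eq_zero_iff_dvd _ _).mp hdvd
      exact ⟨hd, by exact_mod_cast Nat.succ_le_succ (Nat.zero_le k), le_refl _,
        fun e _ _ h2 => h2⟩
    · simp only [cog_findDiv, hdvd, ite_false]
      rcases Nat.eq_zero_or_pos k with hk0 | hk1
      · exfalso; apply hdvd; subst hk0
        exact (PySem.Int.mod_eq_zero_iff_dvd n 1).mpr (one_dvd n)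
      · obtain ⟨ha, hb, hc, hm⟩ := ih hk1
        refine ⟨ha, hb, le_trans hc (by exact_mod_cast Nat.le_succ k), ?_⟩
        intro e he h1 h2
        apply hm e he h1
        have hne : e ≠ ((k+1:Nat):Int) := by
          rintro rfl; exact hdvd ((PySem.Int.mod_eq_zero_iff_dvd _ _).mpr he)
        push_cast at h2 hne; omega

-- the two ports agree on every input
lemma cog_main (n : Int) (p : Bool) :
    calculate_optimal_grid n p = calculate_optimal_grid_alt n p := by
  unfold calculate_optimal_grid calculate_optimal_grid_alt
  by_cases h0 : n ≤ 0
  · rw [if_pos h0, if_pos (by omega : n ≤ 1)]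
  by_cases h1 : n = 1
  · subst h1; norm_num
  have hn : 2 ≤ n := by omega
  have hn0 : (0:Int) < n := by omega
  rw [if_neg h0, if_neg h1, if_neg (by omega : ¬ n ≤ 1)]
  have hs1 : 1 ≤ n.toNat.sqrt := Nat.le_sqrt.mpr (by omega)
  obtain ⟨hBdvd, hB1, hBle, hBmax⟩ := cog_findDiv_spec n n.toNat.sqrt hs1
  have hss_le : ((n.toNat.sqrt : Int)) * (n.toNat.sqrt : Int) ≤ n := by
    have h := Nat.sqrt_le' n.toNat
    have h2 : n.toNat.sqrt * n.toNat.sqrt ≤ n.toNat := by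
      simpa [pow_two] using h
    omega
  have hBsq : cog_findDiv n n.toNat.sqrt * cog_findDiv n n.toNat.sqrt ≤ n := by
    nlinarith
  have hle_s : ∀ e : Int, 1 ≤ e → e * e ≤ n → e ≤ (n.toNat.sqrt : Int) := by
    intro e he hee
    have he' : (0:Int) ≤ e := by omega
    have h3 : e.toNat * e.toNat ≤ n.toNat := by
      zify
      rw [Int.toNat_of_nonneg he', Int.toNat_of_nonneg hn0.le]
      exact hee
    have := Nat.le_sqrt.mpr h3
    omega
  have hK1 : (1:Int) ≤ ((n*2).toNat.sqrt : Int) + 1 := by omega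
  obtain ⟨dA, ⟨hAdvd, hA1, hAK, hAsq, hAmax⟩, hfold⟩ := cog_loop_inv n hn _ hK1
  have hsle2 : ((n.toNat.sqrt : Nat) : Int) ≤ (((n*2).toNat.sqrt : Nat) : Int) := by
    have : n.toNat ≤ (n*2).toNat := by omega
    exact_mod_cast Nat.sqrt_le_sqrt this
  have hAB : dA = cog_findDiv n n.toNat.sqrt := by
    apply le_antisymm
    · exact hBmax dA hAdvd hA1 (hle_s dA hA1 hAsq)
    · exact hAmax _ hBdvd hB1 (by omega) hBsq
  have hd0 : (0:Int) < dA := by omega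
  have hde : n / dA * dA = n := Int.ediv_mul_cancel hAdvd
  have hdle : dA ≤ n / dA := by nlinarith
  simp only [hfold, ← hAB]
  rw [min_eq_left hdle]
  by_cases hc : p = false ∧ n > 3 ∧ PySem.Int.mod n 2 = 1 ∧ dA = 1
  · rw [if_pos hc, if_pos hc]
    have h4 : 4 ≤ n := by
      obtain ⟨-, h3, -, -⟩ := hc; omega
    have hs2 : 2 ≤ n.toNat.sqrt := Nat.le_sqrt.mpr (by omega)
    have hne : ¬ ((n.toNat.sqrt : Int) * (n.toNat.sqrt : Int) = n) := by
      intro heq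
      have hdvd : ((n.toNat.sqrt : Int)) ∣ n := ⟨(n.toNat.sqrt : Int), heq.symm⟩
      have := hBmax _ hdvd (by omega) (le_refl _)
      rw [← hAB, hc.2.2.2] at this
      omega
    rw [if_neg hne]
    have hcx0 : (0:Int) < (n.toNat.sqrt : Int) + 1 := by positivity
    have hb := cog_ceilDiv_bounds (a := n) hcx0
    have hnlt : n < ((n.toNat.sqrt : Int) + 1) * ((n.toNat.sqrt : Int) + 1) := by
      have h2 : n.toNat < (n.toNat.sqrt + 1) * (n.toNat.sqrt + 1) := by
        have h := Nat.lt_succ_sqrt' n.toNat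
        simpa [pow_two, Nat.succ_eq_add_one] using h
      have h3 : (n.toNat : Int) < (((n.toNat.sqrt + 1) * (n.toNat.sqrt + 1) : Nat) : Int) := by
        exact_mod_cast h2
      push_cast at h3
      omega
    have hswap : ¬ ((n.toNat.sqrt : Int) + 1 < cog_ceilDiv n ((n.toNat.sqrt : Int) + 1)) := by
      intro hlt
      have h5 : (n.toNat.sqrt : Int) + 1 ≤ cog_ceilDiv n ((n.toNat.sqrt : Int) + 1) - 1 := by
        omega
      have h6 := mul_le_mul_of_nonneg_right h5 (le_of_lt hcx0)
      nlinarith [hb.1]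
    rw [if_neg hswap]
    rfl
  · rw [if_neg hc, if_neg hc]
    rw [PySem.Int.floordiv_eq_ediv_of_pos hd0]
    by_cases hlt : dA < n / dA
    · rw [if_pos hlt]
    · rw [if_neg hlt]
      have : dA = n / dA := le_antisymm hdle (by omega)
      rw [← this]

-- ===== VERDICT (by name: the statement is the Claim_ definition above) =====
theorem calculate_optimal_grid_spec : Claim_equal_calculate_optimal_grid := by
  intro frame_count prefer_single_row_odd _
  unfold Spec_calculate_optimal_grid
  exact cog_main frame_count prefer_single_row_odd
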